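-- pv_equiv track=rewrite | github.com/clarenous/argodsm-SOR | misc/main.py | combinitions_with_same_volume
-- ===== SOURCE A (Python) =====
-- def all_array_sizes(im_list, jm_list, km_list):
--     result = []
--     for im in im_list:
--         for jm in jm_list:
--             for km in km_list:
--                 result.append((im, jm, km))
--     return result
--
-- def combinitions_with_same_volume(im_list, jm_list, km_list):
--     result_dict = {}
--     sizes = all_array_sizes(im_list, jm_list, km_list)
--     for size in sizes:
--         volume = size[0]*size[1]*size[2]
--         if volume not in result_dict:
--             result_dict[volume] = []
--         result_dict[volume].append((size[0], size[1], size[2]))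
--     return result_dict.items()
-- ===== SOURCE B (Python) =====
-- def combinitions_with_same_volume(im_list, jm_list, km_list):
--     pairs = [(im * jm * km, (im, jm, km))
--              for im in im_list for jm in jm_list for km in km_list]
--     groups = []
--     while pairs:
--         volume = pairs[0][0]
--         groups.append((volume, [t for (v, t) in pairs if v == volume]))
--         pairs = [(v, t) for (v, t) in pairs if v != volume]
--     return dict(groups).items()
-- ===== Notes on version B (the rewrite author's own statement) =====
-- stated objective: alternative
-- what changed: B groups by repeated partitioning instead of a dict: it builds the (volume, triple) pair list once, then repeatedly peels off the first remaining volume, collecting that volume's whole bucket with a scan and recursing on the pairs that are left, with no dict used during grouping.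
import Mathlib
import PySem

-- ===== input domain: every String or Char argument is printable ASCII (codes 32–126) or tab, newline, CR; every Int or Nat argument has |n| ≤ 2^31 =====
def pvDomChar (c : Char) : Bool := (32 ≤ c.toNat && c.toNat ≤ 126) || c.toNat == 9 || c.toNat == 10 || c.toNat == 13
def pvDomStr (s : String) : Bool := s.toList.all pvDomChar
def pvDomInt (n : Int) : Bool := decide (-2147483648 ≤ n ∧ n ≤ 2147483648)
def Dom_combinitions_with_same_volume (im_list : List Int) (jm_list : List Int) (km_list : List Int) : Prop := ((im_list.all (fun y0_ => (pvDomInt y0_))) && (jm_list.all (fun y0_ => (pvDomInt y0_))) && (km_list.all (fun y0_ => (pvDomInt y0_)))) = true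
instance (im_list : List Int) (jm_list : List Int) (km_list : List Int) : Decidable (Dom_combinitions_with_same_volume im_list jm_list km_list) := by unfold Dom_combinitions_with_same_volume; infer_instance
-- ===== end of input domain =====

-- B replaces A's build-all-triples-then-dict-group strategy by repeated partitioning:
-- it peels off the first remaining volume, collects its whole bucket by a scan, and
-- recurses on the leftover pairs — no dict is used during grouping (objective: alternative).


-- ===== PORT A =====
def all_array_sizes (im_list : List Int) (jm_list : List Int) (km_list : List Int) : List (Int × Int × Int) :=
  im_list.foldl (fun result im =>
    jm_list.foldl (fun result jm =>
      km_list.foldl (fun result km => result ++ [(im, jm, km)]) result) result) []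

-- step of A's loop body: 'if volume not in result_dict: result_dict[volume] = []' then
-- 'result_dict[volume].append(...)' (the append on an existing key is Dict.modify)
def pvStepA (d : PySem.Dict Int (List (Int × Int × Int))) (size : Int × Int × Int) :
    PySem.Dict Int (List (Int × Int × Int)) :=
  let volume := size.1 * size.2.1 * size.2.2
  let d := if d.contains volume then d else d.insert volume []
  d.modify volume [] (fun l => l ++ [(size.1, size.2.1, size.2.2)])

def combinitions_with_same_volume (im_list : List Int) (jm_list : List Int) (km_list : List Int) : List (Int × (List (Int × Int × Int))) :=
  let sizes := all_array_sizes im_list jm_list km_list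
  (sizes.foldl pvStepA PySem.Dict.empty).items

-- ===== PORT B =====
-- the while loop of Source B: peel off the first volume's bucket, recurse on the rest
def pvGroupB (ps : List (Int × (Int × Int × Int))) : List (Int × List (Int × Int × Int)) :=
  match ps with
  | [] => []
  | p :: rest =>
    (p.1, ((p :: rest).filter (fun q => q.1 == p.1)).map (fun q => q.2)) ::
      pvGroupB ((p :: rest).filter (fun q => !(q.1 == p.1)))
termination_by ps.length
decreasing_by
  have h := List.length_filter_le (fun q => !(q.1 == p.1)) rest
  simp
  omega

def combinitions_with_same_volume_alt (im_list : List Int) (jm_list : List Int) (km_list : List Int) : List (Int × (List (Int × Int × Int))) :=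
  let pairs := im_list.flatMap (fun im => jm_list.flatMap (fun jm =>
    km_list.map (fun km => (im * jm * km, (im, jm, km)))))
  (PySem.Dict.ofList (pvGroupB pairs)).items

-- ===== PRECONDITION & SPEC =====
def Spec_combinitions_with_same_volume (im_list : List Int) (jm_list : List Int) (km_list : List Int) (out : List (Int × (List (Int × Int × Int)))) : Prop := out = combinitions_with_same_volume_alt im_list jm_list km_list
instance (im_list : List Int) (jm_list : List Int) (km_list : List Int) (out : List (Int × (List (Int × Int × Int)))) : Decidable (Spec_combinitions_with_same_volume im_list jm_list km_list out) := by unfold Spec_combinitions_with_same_volume; infer_instance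

-- ===== CLAIM (what is proved, stated in full; the proofs are below) =====
def Claim_equal_combinitions_with_same_volume : Prop := ∀ (im_list : List Int) (jm_list : List Int) (km_list : List Int), Dom_combinitions_with_same_volume im_list jm_list km_list → Spec_combinitions_with_same_volume im_list jm_list km_list (combinitions_with_same_volume im_list jm_list km_list)

-- ===== LEMMAS AND PROOFS =====

-- A's step equals the one-shot Dict.modify
theorem pvStepA_eq (d : PySem.Dict Int (List (Int × Int × Int))) (s : Int × Int × Int) :
    pvStepA d s = d.modify (s.1 * s.2.1 * s.2.2) [] (fun l => l ++ [s]) := by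
  unfold pvStepA PySem.Dict.modify
  by_cases h : d.contains (s.1 * s.2.1 * s.2.2) = true
  · simp only [h, if_true]
  · simp only [Bool.not_eq_true] at h
    simp only [h, Bool.false_eq_true, if_false]
    rw [PySem.Dict.getD_insert_self, PySem.Dict.insert_insert_self,
        PySem.Dict.getD_of_not_contains d _ h]

-- A's intermediate list, as a flatMap
theorem all_array_sizes_eq (im_list jm_list km_list : List Int) :
    all_array_sizes im_list jm_list km_list =
      im_list.flatMap (fun im => jm_list.flatMap (fun jm =>
        km_list.map (fun km => (im, jm, km)))) := by
  unfold all_array_sizes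
  have h1 : ∀ im : Int,
      (fun (result : List (Int × Int × Int)) (jm : Int) =>
        km_list.foldl (fun result km => result ++ [(im, jm, km)]) result)
      = (fun result jm => result ++ km_list.map (fun km => (im, jm, km))) := by
    intro im; funext result jm
    rw [PySem.List.foldl_append_eq_flatMap, ← List.map_eq_flatMap]
  have h2 : (fun (result : List (Int × Int × Int)) (im : Int) =>
        jm_list.foldl (fun result jm =>
          km_list.foldl (fun result km => result ++ [(im, jm, km)]) result) result)
      = (fun result im => result ++ jm_list.flatMap (fun jm =>
          km_list.map (fun km => (im, jm, km)))) := by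
    funext result im
    rw [h1 im, PySem.List.foldl_append_eq_flatMap]
  rw [h2, PySem.List.foldl_append_eq_flatMap]
  simp

-- first-occurrence dedup commutes with filtering
theorem ofList_filter_comm (p : Int → Bool) (ks : List Int) :
    PySem.Set.ofList (ks.filter p) = (PySem.Set.ofList ks).filter p := by
  induction ks with
  | nil => rfl
  | cons k ks ih =>
    by_cases hk : p k = true
    · rw [List.filter_cons_of_pos hk, PySem.Set.ofList_cons, PySem.Set.ofList_cons, ih]
      unfold PySem.Set.discard
      rw [List.filter_cons_of_pos hk, List.filter_comm]
    · rw [List.filter_cons_of_neg (by simp [hk]), PySem.Set.ofList_cons, ih]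
      unfold PySem.Set.discard
      rw [List.filter_cons_of_neg (by simp [hk]), List.filter_comm]
      symm
      apply List.filter_eq_self.2
      intro a ha
      rcases List.mem_filter.1 ha with ⟨_, hpa⟩
      rcases eq_or_ne a k with rfl | hne
      · exact absurd hpa hk
      · simp [hne]

-- characterisation of pvGroupB: first-occurrence volumes, each with its full bucket
theorem pvGroupB_eq (ps : List (Int × (Int × Int × Int))) :
    pvGroupB ps = (PySem.Set.ofList (ps.map (fun q => q.1))).map
      (fun v => (v, (ps.filter (fun q => q.1 == v)).map (fun q => q.2))) := by
  induction ps using pvGroupB.induct with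
  | case1 => rw [pvGroupB]; rfl
  | case2 p rest ih =>
    rw [pvGroupB]
    rw [List.map_cons, PySem.Set.ofList_cons, List.map_cons]
    congr 1
    rw [ih]
    have hfil : (p :: rest).filter (fun q => !(q.1 == p.1))
        = rest.filter (fun q => !(q.1 == p.1)) := by
      simp
    rw [hfil]
    have hmapfst : (rest.filter (fun q => !(q.1 == p.1))).map (fun q => q.1)
        = (rest.map (fun q => q.1)).filter (fun k => !(k == p.1)) := by
      rw [List.filter_map]; rfl
    rw [hmapfst, ofList_filter_comm]
    show ((PySem.Set.ofList (rest.map (fun q => q.1))).filter (fun k => !(k == p.1))).map _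
        = ((PySem.Set.ofList (rest.map (fun q => q.1))).discard p.1).map _
    unfold PySem.Set.discard
    apply List.map_congr_left
    intro v hv
    rcases List.mem_filter.1 hv with ⟨_, hne⟩
    have hvne : v ≠ p.1 := by simpa using hne
    congr 1
    have hv2 : (p :: rest).filter (fun q => q.1 == v) = rest.filter (fun q => q.1 == v) :=
      List.filter_cons_of_neg (by simp [Ne.symm hvne])
    rw [List.filter_filter, hv2]
    congr 1
    apply List.filter_congr
    intro q _
    by_cases hq : (q.1 == v) = true
    · have : q.1 = v := by simpa using hq
      simp [this, hvne]
    · simp [Bool.eq_false_iff.2 hq]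

-- ===== VERDICT (by name: the statement is the Claim_ definition above) =====
theorem combinitions_with_same_volume_spec : Claim_equal_combinitions_with_same_volume := by
  intro im_list jm_list km_list _
  show combinitions_with_same_volume im_list jm_list km_list
      = combinitions_with_same_volume_alt im_list jm_list km_list
  unfold combinitions_with_same_volume combinitions_with_same_volume_alt
  dsimp only
  -- both sides over the same pair list
  set pairs : List (Int × (Int × Int × Int)) := im_list.flatMap (fun im => jm_list.flatMap (fun jm =>
    km_list.map (fun km => (im * jm * km, (im, jm, km))))) with hpairs
  -- A's fold over sizes is the modify-fold over pairs
  have hA : (all_array_sizes im_list jm_list km_list).foldl pvStepA PySem.Dict.empty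
      = pairs.foldl (fun d p => d.modify p.1 [] (fun l => l ++ [p.2])) PySem.Dict.empty := by
    have hm : pairs = (all_array_sizes im_list jm_list km_list).map
        (fun s => (s.1 * s.2.1 * s.2.2, s)) := by
      rw [all_array_sizes_eq, hpairs]
      simp [List.map_flatMap, Function.comp_def]
    rw [hm, List.foldl_map]
    congr 1
    funext d s
    exact pvStepA_eq d s
  rw [hA]
  -- characterise A's dict items
  have hnodup : (pairs.foldl (fun d p => d.modify p.1 [] (fun l => l ++ [p.2]))
      PySem.Dict.empty).keys.Nodup :=
    PySem.Dict.nodup_keys_foldl_modify_key pairs (fun p => p.1) [] (fun _ p l => l ++ [p.2])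
      PySem.Dict.empty (by simp)
  rw [PySem.Dict.items_eq_map_keys _ hnodup []]
  rw [PySem.Dict.keys_foldl_modify_key pairs (fun p => p.1) [] (fun _ p l => l ++ [p.2])]
  have hkeys : PySem.Set.update (PySem.Dict.empty : PySem.Dict Int (List (Int × Int × Int))).keys
      (pairs.map (fun p => p.1)) = PySem.Set.ofList (pairs.map (fun p => p.1)) := rfl
  rw [hkeys]
  have hget : ∀ v : Int, (pairs.foldl (fun d p => d.modify p.1 [] (fun l => l ++ [p.2]))
      PySem.Dict.empty).getD v [] = (pairs.filter (fun p => p.1 == v)).map (fun p => p.2) := by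
    intro v
    rw [PySem.Dict.getD_foldl_modify_append]
    simp [PySem.Dict.getD_empty]
  -- B's final dict over fresh distinct keys just reproduces the group list
  have hBnodup : ((pvGroupB pairs).map (fun g => g.1)).Nodup := by
    rw [pvGroupB_eq]
    simp only [List.map_map]
    have : ((fun g : Int × List (Int × Int × Int) => g.1) ∘
        (fun v => (v, (pairs.filter (fun q => q.1 == v)).map (fun q => q.2)))) = id := rfl
    rw [this, List.map_id]
    exact PySem.Set.nodup_ofList _
  have hB : (PySem.Dict.ofList (pvGroupB pairs)).items = pvGroupB pairs := by
    show (List.foldl (fun acc p => acc.insert p.1 p.2) PySem.Dict.empty (pvGroupB pairs)).items = _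
    rw [PySem.Dict.items_foldl_insert_fresh (pvGroupB pairs) (fun g => g.1) (fun g => g.2)
      PySem.Dict.empty (fun _ _ => PySem.Dict.contains_empty _) hBnodup]
    have he : (PySem.Dict.empty : PySem.Dict Int (List (Int × Int × Int))).items = [] := rfl
    simp [he]
  rw [hB, pvGroupB_eq]
  apply List.map_congr_left
  intro v _
  rw [hget v]
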